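-- pv_equiv track=rewrite | github.com/Militeee/HMOBSTER | mobster/utils_mobster.py | get_clones_counts
-- ===== SOURCE A (Python) =====
-- def get_clones_counts(theoretical_num_clones):
--     uniques = list(set(theoretical_num_clones))
--     uniques = {k : 0 for k in uniques}
--     res = [None] * len(theoretical_num_clones)
--     for i in range(len(theoretical_num_clones)):
--         res[i] = uniques[theoretical_num_clones[i]]
--         uniques[theoretical_num_clones[i]] += 1
--     return(res)
-- ===== SOURCE B (Python) =====
-- def get_clones_counts(theoretical_num_clones):
--     n = len(theoretical_num_clones)
--     res = [0] * n
--     for v in set(theoretical_num_clones):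
--         positions = [i for i in range(n) if theoretical_num_clones[i] == v]
--         for rank, pos in enumerate(positions):
--             res[pos] = rank
--     return res
-- ===== Notes on version B (the rewrite author's own statement) =====
-- stated objective: alternative
-- what changed: Replaces A's index-major single pass with a running-counter dict by a value-major group-and-scatter: for each distinct value, collect its positions and scatter ranks 0,1,2,... into a preallocated result array.
import Mathlib
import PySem

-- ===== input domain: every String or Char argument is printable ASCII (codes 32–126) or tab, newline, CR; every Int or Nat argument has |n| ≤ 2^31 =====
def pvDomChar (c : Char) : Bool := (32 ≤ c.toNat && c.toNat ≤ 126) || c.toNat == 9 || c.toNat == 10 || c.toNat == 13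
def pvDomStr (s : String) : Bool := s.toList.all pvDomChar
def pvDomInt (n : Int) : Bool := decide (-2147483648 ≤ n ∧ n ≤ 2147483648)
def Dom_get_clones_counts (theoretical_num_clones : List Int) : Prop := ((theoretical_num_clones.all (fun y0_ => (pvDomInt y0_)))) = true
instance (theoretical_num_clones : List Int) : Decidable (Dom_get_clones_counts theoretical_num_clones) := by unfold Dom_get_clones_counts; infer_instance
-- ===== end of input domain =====

-- B replaces A's index-major running-counter pass by a value-major group-and-scatter; same return value, different traversal.

-- ===== PORT A =====
-- res[i] := assignment-in-index-order is transcribed as appending to the result list (exact: indices 0..n-1 filled in order).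
-- uniques[x] is a plain dict access; the key is always present (inserted from set(xs)), so getD 0 returns the stored value exactly.
def get_clones_counts (theoretical_num_clones : List Int) : List Int :=
  let uniques : PySem.Dict Int Int :=
    (PySem.Set.ofList theoretical_num_clones).foldl (fun d k => d.insert k 0) PySem.Dict.empty
  let st :=
    (PySem.List.pyRange 0 theoretical_num_clones.length 1).foldl
      (fun (p : List Int × PySem.Dict Int Int) i =>
        let x := PySem.List.pyGetD theoretical_num_clones i 0
        (p.1 ++ [p.2.getD x 0], p.2.insert x (p.2.getD x 0 + 1)))
      ([], uniques)
  st.1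

-- ===== PORT B =====
-- [i for i in range(n) if xs[i] == v] → List.range n filtered; xs[i] with 0 ≤ i < n is exactly getD i 0.
-- enumerate(positions) → PySem.List.enumerate positions 0 (pairs (rank, pos)); res[pos] = rank → List.set.
def get_clones_counts_alt (theoretical_num_clones : List Int) : List Int :=
  let n := theoretical_num_clones.length
  (PySem.Set.ofList theoretical_num_clones).foldl
    (fun res v =>
      let positions := (List.range n).filter (fun i => theoretical_num_clones.getD i 0 == v)
      (PySem.List.enumerate positions 0).foldl
        (fun r (p : Int × Nat) => r.set p.2 p.1) res)
    (List.replicate n 0)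

-- ===== PRECONDITION & SPEC =====
def Spec_get_clones_counts (theoretical_num_clones : List Int) (out : List Int) : Prop := out = get_clones_counts_alt theoretical_num_clones
instance (theoretical_num_clones : List Int) (out : List Int) : Decidable (Spec_get_clones_counts theoretical_num_clones out) := by unfold Spec_get_clones_counts; infer_instance

-- ===== CLAIM (what is proved, stated in full; the proofs are below) =====
def Claim_equal_get_clones_counts : Prop := ∀ (theoretical_num_clones : List Int), Dom_get_clones_counts theoretical_num_clones → Spec_get_clones_counts theoretical_num_clones (get_clones_counts theoretical_num_clones)

-- ===== LEMMAS AND PROOFS =====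

-- the common target: res[i] = number of equal values strictly before index i
def pvTarget (xs : List Int) : List Int :=
  (List.range xs.length).map (fun i => ((xs.take i).count (xs.getD i 0) : Int))

-- ---------- A-side ----------

-- the initial dict maps every key to 0
theorem getD_init_zero (ks : List Int) (d : PySem.Dict Int Int)
    (h : ∀ v, d.getD v 0 = 0) (v : Int) :
    (ks.foldl (fun d k => d.insert k 0) d).getD v 0 = 0 := by
  induction ks generalizing d with
  | nil => exact h v
  | cons k ks ih =>
      apply ih
      intro w
      rw [PySem.Dict.getD_insert]
      split <;> simp [h]

-- main loop invariant: if d counts the prefix, the loop emits prefix counts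
theorem loop_invariant (suf pre res0 : List Int) (d : PySem.Dict Int Int)
    (h : ∀ v, d.getD v 0 = (pre.count v : Int)) :
    (suf.foldl
      (fun (p : List Int × PySem.Dict Int Int) x =>
        (p.1 ++ [p.2.getD x 0], p.2.insert x (p.2.getD x 0 + 1)))
      (res0, d)).1
    = res0 ++ (List.range suf.length).map
        (fun i => (((pre ++ suf).take (pre.length + i)).count ((pre ++ suf).getD (pre.length + i) 0) : Int)) := by
  induction suf generalizing pre res0 d with
  | nil => simp
  | cons x s ih =>
      simp only [List.foldl_cons, List.length_cons, List.range_succ_eq_map, List.map_cons,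
        List.map_map]
      have hx : (pre ++ x :: s).getD (pre.length + 0) 0 = x := by simp
      have htake : (pre ++ x :: s).take (pre.length + 0) = pre := by simp
      rw [ih (pre ++ [x]) _ _ (by
        intro v
        rw [PySem.Dict.getD_insert]
        split
        · subst v; simp [h x, List.count_append]
        · rename_i hne
          simp [List.count_append, h v, List.count_cons]
          omega)]
      rw [h x]
      simp only [hx, htake, List.append_assoc, List.singleton_append]
      congr 1
      congr 1
      apply List.map_congr_left
      intro i _
      have hlen : (pre ++ [x]).length + i = pre.length + (i + 1) := by simp; omega
      simp only [Function.comp, hlen]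

theorem A_eq_target (xs : List Int) : get_clones_counts xs = pvTarget xs := by
  unfold get_clones_counts pvTarget
  simp only []
  rw [PySem.List.foldl_pyRange_zero_pyGetD' xs 0
    (fun (p : List Int × PySem.Dict Int Int) x =>
      (p.1 ++ [p.2.getD x 0], p.2.insert x (p.2.getD x 0 + 1)))]
  rw [loop_invariant xs [] []
    ((PySem.Set.ofList xs).foldl (fun d k => d.insert k 0) PySem.Dict.empty)
    (by intro v; exact getD_init_zero _ _ (by simp [PySem.Dict.getD_empty]) v)]
  simp

-- ---------- B-side ----------

-- scatter over a nodup position list: pointwise effect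
theorem scatter_getElem? (P : List Nat) (hnd : P.Nodup) (s : Int) (res : List Int)
    (hP : ∀ p ∈ P, p < res.length) (i : Nat) :
    ((PySem.List.enumerate P s).foldl (fun r (p : Int × Nat) => r.set p.2 p.1) res)[i]?
    = if i ∈ P then some (s + (P.idxOf i : Int)) else res[i]? := by
  induction P generalizing s res with
  | nil => simp [PySem.List.enumerate_nil]
  | cons p P ih =>
      rw [PySem.List.enumerate_cons]
      simp only [List.foldl_cons]
      have hnd' := hnd
      simp only [List.nodup_cons] at hnd'
      rw [ih hnd'.2 (s+1) (res.set p s) (by intro q hq; simpa using hP q (List.mem_cons_of_mem _ hq))]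
      by_cases hip : i = p
      · subst hip
        have : i ∉ P := hnd'.1
        simp [this, List.getElem?_set_self (hP i (List.mem_cons_self)), List.idxOf_cons_self]
      · simp only [List.getElem?_set_ne (fun h => hip h.symm)]
        by_cases hiP : i ∈ P
        · have : i ∈ p :: P := List.mem_cons_of_mem _ hiP
          simp only [hiP, this, if_true]
          rw [List.idxOf_cons_ne _ (fun h => hip h.symm)]
          push_cast
          ring_nf
        · simp [hiP, hip]

theorem scatter_length (P : List Nat) (s : Int) (res : List Int) :
    ((PySem.List.enumerate P s).foldl (fun r (p : Int × Nat) => r.set p.2 p.1) res).length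
    = res.length := by
  induction P generalizing s res with
  | nil => simp [PySem.List.enumerate_nil]
  | cons p P ih =>
      rw [PySem.List.enumerate_cons]
      simp only [List.foldl_cons]
      rw [ih]
      simp

-- index of i in the filtered range = number of earlier indices satisfying q
theorem idxOf_filter_range (q : Nat → Bool) (i n : Nat) (hi : i < n) (hq : q i = true) :
    (((List.range n).filter q).idxOf i) = ((List.range i).filter q).length := by
  induction n with
  | zero => omega
  | succ n ih =>
      rw [List.range_succ, List.filter_append]
      by_cases hin : i = n
      · subst hin
        have hnot : i ∉ (List.range i).filter q := by simp
        rw [List.idxOf_append_of_notMem hnot]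
        simp [hq]
      · have hi' : i < n := by omega
        have hmem : i ∈ (List.range n).filter q := by simp [hi', hq]
        rw [List.idxOf_append_of_mem hmem]
        exact ih hi'

-- prefix count via filtered range
theorem count_take_eq_filter_range (xs : List Int) (v : Int) (i : Nat) (hi : i ≤ xs.length) :
    ((xs.take i).count v) = ((List.range i).filter (fun j => xs.getD j 0 == v)).length := by
  induction i with
  | zero => simp
  | succ i ih =>
      have hi' : i < xs.length := by omega
      have htake : xs.take (i+1) = xs.take i ++ [xs[i]] := by
        rw [List.take_add_one]; simp [List.getElem?_eq_getElem hi']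
      rw [htake, List.range_succ, List.filter_append, List.count_append,
        ih (by omega), List.length_append]
      by_cases hv : xs[i] = v
      · have hb : (xs[i] == v) = true := by simp [hv]
        simp [List.filter, List.getD, List.getElem?_eq_getElem hi', hb, List.count_singleton, hv]
      · have hb : (xs[i] == v) = false := by simp [hv]
        simp [List.filter, List.getD, List.getElem?_eq_getElem hi', hb, hv]

-- outer fold invariant: positions of processed values hold prefix counts, the rest still hold 0
theorem outer_inv (xs : List Int) (W : List Int) (res : List Int) (D : List Int)
    (hlen : res.length = xs.length)
    (h : ∀ i, i < xs.length → res[i]? =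
      some (if xs.getD i 0 ∈ D then ((xs.take i).count (xs.getD i 0) : Int) else 0)) :
    (W.foldl (fun res v =>
        (PySem.List.enumerate
            ((List.range xs.length).filter (fun i => xs.getD i 0 == v)) 0).foldl
          (fun r (p : Int × Nat) => r.set p.2 p.1) res) res).length = xs.length ∧
    ∀ i, i < xs.length →
      (W.foldl (fun res v =>
        (PySem.List.enumerate
            ((List.range xs.length).filter (fun i => xs.getD i 0 == v)) 0).foldl
          (fun r (p : Int × Nat) => r.set p.2 p.1) res) res)[i]? =
      some (if xs.getD i 0 ∈ D ++ W then ((xs.take i).count (xs.getD i 0) : Int) else 0) := by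
  induction W generalizing res D with
  | nil =>
      simp only [List.foldl_nil, List.append_nil]
      exact ⟨hlen, h⟩
  | cons v W ih =>
      simp only [List.foldl_cons]
      have hnd : ((List.range xs.length).filter (fun i => xs.getD i 0 == v)).Nodup :=
        (List.nodup_range).filter _
      have hP : ∀ p ∈ (List.range xs.length).filter (fun i => xs.getD i 0 == v),
          p < res.length := by
        intro p hp
        rw [hlen]
        exact List.mem_range.mp (List.mem_of_mem_filter hp)
      have hlen' := scatter_length ((List.range xs.length).filter (fun i => xs.getD i 0 == v)) 0 res
      have h' : ∀ i, i < xs.length →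
          ((PySem.List.enumerate
              ((List.range xs.length).filter (fun i => xs.getD i 0 == v)) 0).foldl
            (fun r (p : Int × Nat) => r.set p.2 p.1) res)[i]? =
          some (if xs.getD i 0 ∈ D ++ [v] then ((xs.take i).count (xs.getD i 0) : Int) else 0) := by
        intro i hi
        rw [scatter_getElem? _ hnd 0 res hP i]
        by_cases hv : xs.getD i 0 = v
        · have hmem : i ∈ (List.range xs.length).filter (fun i => xs.getD i 0 == v) := by
            simp only [List.mem_filter, List.mem_range, beq_iff_eq]
            exact ⟨hi, hv⟩
          rw [if_pos hmem, idxOf_filter_range _ i xs.length hi (by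
              simp only [beq_iff_eq]; exact hv),
            ← count_take_eq_filter_range xs v i (by omega)]
          have hv' : xs[i]?.getD 0 = v := by
            simpa [List.getD] using hv
          simp [hv']
        · have hmem : i ∉ (List.range xs.length).filter (fun i => xs.getD i 0 == v) := by
            simp only [List.mem_filter, List.mem_range, beq_iff_eq]
            tauto
          rw [if_neg hmem, h i hi]
          have hd : (xs.getD i 0 ∈ D ++ [v]) ↔ (xs.getD i 0 ∈ D) := by
            simp only [List.mem_append, List.mem_singleton]
            tauto
          simp only [hd]
      have := ih _ (D ++ [v]) (by rw [hlen', hlen]) h'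
      refine ⟨this.1, fun i hi => ?_⟩
      rw [(this.2 i hi)]
      have : (xs.getD i 0 ∈ (D ++ [v]) ++ W) ↔ (xs.getD i 0 ∈ D ++ v :: W) := by
        simp
      simp only [this]

theorem B_eq_target (xs : List Int) : get_clones_counts_alt xs = pvTarget xs := by
  unfold get_clones_counts_alt
  simp only []
  have h0 : ∀ i, i < xs.length → (List.replicate xs.length (0 : Int))[i]? =
      some (if xs.getD i 0 ∈ ([] : List Int) then ((xs.take i).count (xs.getD i 0) : Int) else 0) := by
    intro i hi
    simp [hi]
  have H := outer_inv xs (PySem.Set.ofList xs) (List.replicate xs.length 0) []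
    (by simp) h0
  apply List.ext_getElem?
  intro i
  by_cases hi : i < xs.length
  · rw [H.2 i hi]
    have hmem : xs.getD i 0 ∈ ([] : List Int) ++ PySem.Set.ofList xs := by
      have : xs.getD i 0 ∈ xs := by
        have hm := List.getElem_mem hi
        simp [List.getD, List.getElem?_eq_getElem hi]
      simpa [PySem.Set.mem_ofList] using this
    rw [if_pos hmem]
    unfold pvTarget
    simp [hi]
  · have h1 : xs.length ≤ i := by omega
    have e1 : (pvTarget xs)[i]? = none := by
      apply List.getElem?_eq_none
      unfold pvTarget
      simpa using h1
    rw [e1]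
    apply List.getElem?_eq_none
    rw [H.1]
    exact h1

-- ===== VERDICT (by name: the statement is the Claim_ definition above) =====
theorem get_clones_counts_spec : Claim_equal_get_clones_counts := by
  intro xs _
  unfold Spec_get_clones_counts
  rw [A_eq_target, B_eq_target]
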